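-- pv_equiv track=rewrite | github.com/kycd/onlinejudge | HackerRank/w35/p2-triple-recursion.py | tripleRecursion
-- ===== SOURCE A (Python) =====
-- def fillMatrixHorizontal(matrix, n, p):
--     for i in range(p + 1, n):
--         matrix[p][i] = matrix[p][i-1] - 1
--     return matrix
--
-- def fillMatrixVertical(matrix, n, p):
--     for i in range(p + 1, n):
--         matrix[i][p] = matrix[i-1][p] - 1
--     return matrix
--
-- def tripleRecursion(n, m, k):
--     matrix = [[0 for x in range(n)] for y in range(n)]
--     matrix[0][0] = m;
--     matrix = fillMatrixHorizontal(matrix, n, 0)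
--     matrix = fillMatrixVertical(matrix, n, 0)
--
--     for i in range(1, n):
--         matrix[i][i] = matrix[i-1][i-1] + k
--         matrix = fillMatrixHorizontal(matrix, n, i)
--         matrix = fillMatrixVertical(matrix, n, i)
--
--     return matrix
-- ===== SOURCE B (Python) =====
-- def tripleRecursion(n, m, k):
--     # closed form: entry (i, j) is m + min(i, j)*k - |i - j|
--     return [[m + min(i, j) * k - abs(i - j) for j in range(n)] for i in range(n)]
-- ===== Notes on version B (the rewrite author's own statement) =====
-- stated objective: simpler
-- what changed: Replaces the diagonal-anchor-then-spread triple loop with a single nested comprehension computing each entry independently from the closed form m + min(i,j)*k - |i-j|.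
import Mathlib
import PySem

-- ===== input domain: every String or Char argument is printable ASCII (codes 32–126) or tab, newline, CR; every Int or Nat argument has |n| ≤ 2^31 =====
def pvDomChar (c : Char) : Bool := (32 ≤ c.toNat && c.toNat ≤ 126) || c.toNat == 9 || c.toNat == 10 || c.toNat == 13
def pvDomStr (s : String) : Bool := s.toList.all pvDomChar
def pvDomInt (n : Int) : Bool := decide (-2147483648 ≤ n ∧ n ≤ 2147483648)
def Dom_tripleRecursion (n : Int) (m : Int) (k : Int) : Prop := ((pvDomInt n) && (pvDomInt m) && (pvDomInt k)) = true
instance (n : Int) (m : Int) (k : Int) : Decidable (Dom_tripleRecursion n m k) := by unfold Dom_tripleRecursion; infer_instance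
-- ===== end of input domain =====

-- B replaces A's diagonal-anchor-then-spread triple loop by a single nested comprehension computing each entry from the closed form m + min(i,j)*k - |i-j|.

-- ===== PORT A =====
-- matrix[r][c] read; exact on the in-range indices A uses under Pre_ (all reads are in range there)
def pvGet2 (mat : List (List Int)) (r c : Int) : Int :=
  ((PySem.List.pyGet? mat r).bind (fun row => PySem.List.pyGet? row c)).getD 0

-- matrix[r][c] = v assignment; exact on the in-range indices A assigns under Pre_ (all writes are in range there)
def pvSet2 (mat : List (List Int)) (r c : Int) (v : Int) : List (List Int) :=
  match PySem.List.pyGet? mat r with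
  | some row => PySem.List.pySetD mat r (PySem.List.pySetD row c v)
  | none => mat

def pvFillH (mat : List (List Int)) (n p : Int) : List (List Int) :=
  (PySem.List.pyRange (p + 1) n 1).foldl
    (fun mt i => pvSet2 mt p i (pvGet2 mt p (i - 1) - 1)) mat

def pvFillV (mat : List (List Int)) (n p : Int) : List (List Int) :=
  (PySem.List.pyRange (p + 1) n 1).foldl
    (fun mt i => pvSet2 mt i p (pvGet2 mt (i - 1) p - 1)) mat

def tripleRecursion (n : Int) (m : Int) (k : Int) : List (List Int) :=
  let matrix := (PySem.List.pyRange 0 n 1).map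
    (fun _ => (PySem.List.pyRange 0 n 1).map (fun _ => (0 : Int)))
  let matrix := pvSet2 matrix 0 0 m
  let matrix := pvFillH matrix n 0
  let matrix := pvFillV matrix n 0
  (PySem.List.pyRange 1 n 1).foldl
    (fun mt i =>
      let mt := pvSet2 mt i i (pvGet2 mt (i - 1) (i - 1) + k)
      let mt := pvFillH mt n i
      pvFillV mt n i) matrix


-- ===== PORT B =====
def tripleRecursion_alt (n : Int) (m : Int) (k : Int) : List (List Int) :=
  (PySem.List.pyRange 0 n 1).map (fun i =>
    (PySem.List.pyRange 0 n 1).map (fun j => m + min i j * k - |i - j|))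


-- ===== PRECONDITION & SPEC =====
-- Pre_ excludes exactly n ≤ 0, where A raises IndexError reading matrix[0][0] of an empty matrix.
def Pre_tripleRecursion (n : Int) (m : Int) (k : Int) : Prop := 1 ≤ n
instance (n : Int) (m : Int) (k : Int) : Decidable (Pre_tripleRecursion n m k) := by
  unfold Pre_tripleRecursion; infer_instance

def pvWitness_tripleRecursion : Int × Int × Int := (3, 5, 2)

def Spec_tripleRecursion (n : Int) (m : Int) (k : Int) (out : List (List Int)) : Prop :=
  out = tripleRecursion_alt n m k
instance (n : Int) (m : Int) (k : Int) (out : List (List Int)) : Decidable (Spec_tripleRecursion n m k out) := by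
  unfold Spec_tripleRecursion; infer_instance

-- ===== CLAIM (what is proved, stated in full; the proofs are below) =====
def Claim_equal_tripleRecursion : Prop := ∀ (n : Int) (m : Int) (k : Int),
  Dom_tripleRecursion n m k → Pre_tripleRecursion n m k →
  Spec_tripleRecursion n m k (tripleRecursion n m k)

-- ===== LEMMAS AND PROOFS =====

-- functional view of an n×n matrix, used only by the proofs
def mkM (N : Nat) (f : Nat → Nat → Int) : List (List Int) :=
  (List.range N).map (fun i => (List.range N).map (fun j => f i j))

theorem mkM_congr (N : Nat) (f g : Nat → Nat → Int)
    (h : ∀ i j, i < N → j < N → f i j = g i j) : mkM N f = mkM N g := by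
  unfold mkM
  refine List.map_congr_left (fun i hi => ?_)
  refine List.map_congr_left (fun j hj => ?_)
  exact h i j (List.mem_range.mp hi) (List.mem_range.mp hj)

theorem get2_mk (N : Nat) (f : Nat → Nat → Int) (r c : Nat) (hr : r < N) (hc : c < N) :
    pvGet2 (mkM N f) (r : Int) (c : Int) = f r c := by
  simp [pvGet2, mkM, PySem.List.pyGet?_natCast, hr, hc]

theorem set2_mk (N : Nat) (f : Nat → Nat → Int) (r c : Nat) (v : Int) (hr : r < N) (hc : c < N) :
    pvSet2 (mkM N f) (r : Int) (c : Int) v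
      = mkM N (fun i j => if i = r ∧ j = c then v else f i j) := by
  unfold pvSet2
  rw [PySem.List.pyGet?_natCast]
  have hget : (mkM N f)[r]? = some ((List.range N).map (fun j => f r j)) := by
    simp [mkM, hr]
  rw [hget]
  simp only [PySem.List.pySetD_natCast]
  apply List.ext_getElem
  · simp [mkM]
  · intro i h1 h2
    simp only [mkM, List.getElem_map, List.getElem_range] at *
    by_cases hir : i = r
    · subst hir
      rw [List.getElem_set_self (by simp; exact hr)]
      · apply List.ext_getElem
        · simp
        · intro j j1 j2
          simp only [List.getElem_map, List.getElem_range] at *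
          by_cases hjc : j = c
          · subst hjc; rw [List.getElem_set_self]; simp
          · rw [List.getElem_set_ne (by simpa using fun hh => hjc hh.symm)]
            simp [hjc]
    · rw [List.getElem_set_ne (by simpa using fun hh => hir hh.symm)]
      simp [hir]

theorem fillH_aux (N P : Nat) (f : Nat → Nat → Int) (hP : P < N) :
    ∀ d c, c + d = N → P < c →
    (PySem.List.pyRange (c : Int) (N : Int) 1).foldl
        (fun mt i => pvSet2 mt (P : Int) i (pvGet2 mt (P : Int) (i - 1) - 1))
        (mkM N (fun i j => if i = P ∧ P < j ∧ j < c then f P P - ((j : Int) - (P : Int)) else f i j))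
      = mkM N (fun i j => if i = P ∧ P < j ∧ j < N then f P P - ((j : Int) - (P : Int)) else f i j) := by
  intro d
  induction d with
  | zero =>
    intro c hc hPc
    have : c = N := by omega
    subst this
    rw [PySem.List.pyRange_one_eq_nil (le_refl _)]
    rfl
  | succ d ih =>
    intro c hc hPc
    have hcN : c < N := by omega
    rw [PySem.List.pyRange_one_cons (by exact_mod_cast hcN)]
    simp only [List.foldl_cons]
    have hc1 : ((c : Int) - 1) = (((c - 1 : Nat)) : Int) := by omega
    rw [hc1, get2_mk N _ P (c - 1) hP (by omega)]
    rw [set2_mk N _ P c _ hP hcN]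
    have hcast : ((c : Int) + 1) = (((c + 1 : Nat)) : Int) := by omega
    rw [hcast]
    have hcon : mkM N (fun i j => if i = P ∧ j = c then
          (if P = P ∧ P < c - 1 ∧ c - 1 < c then f P P - (((c - 1 : Nat) : Int) - (P : Int)) else f P (c - 1)) - 1
        else if i = P ∧ P < j ∧ j < c then f P P - ((j : Int) - (P : Int)) else f i j)
        = mkM N (fun i j => if i = P ∧ P < j ∧ j < c + 1 then f P P - ((j : Int) - (P : Int)) else f i j) := by
      apply mkM_congr
      intro i j hi hj
      by_cases hij : i = P ∧ j = c
      · obtain ⟨hi', hj'⟩ := hij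
        rw [if_pos ⟨hi', hj'⟩, if_pos (show i = P ∧ P < j ∧ j < c + 1 from ⟨hi', by omega, by omega⟩), hj']
        by_cases hPl : P < c - 1
        · rw [if_pos (⟨rfl, hPl, by omega⟩ : P = P ∧ P < c - 1 ∧ c - 1 < c)]
          have he : (((c - 1 : Nat)) : Int) - (P : Int) = ((c : Int) - (P : Int)) - 1 := by omega
          rw [he]; ring
        · have hPe : P = c - 1 := by omega
          rw [if_neg (by omega)]
          rw [← hPe]
          have he : ((c : Int) - (P : Int)) = 1 := by omega
          rw [he]
      · rw [if_neg hij]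
        by_cases h2 : i = P ∧ P < j ∧ j < c
        · rw [if_pos h2, if_pos ⟨h2.1, h2.2.1, by omega⟩]
        · rw [if_neg h2, if_neg ?_]
          rintro ⟨ha, hb, hcc⟩
          by_cases hjc : j = c
          · exact hij ⟨ha, hjc⟩
          · exact h2 ⟨ha, hb, by omega⟩
    rw [hcon]
    exact ih (c + 1) (by omega) (by omega)

theorem fillH_mk (N P : Nat) (f : Nat → Nat → Int) (hP : P < N) :
    pvFillH (mkM N f) (N : Int) (P : Int)
      = mkM N (fun i j => if i = P ∧ P < j then f P P - ((j : Int) - (P : Int)) else f i j) := by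
  unfold pvFillH
  have hcast : ((P : Int) + 1) = (((P + 1 : Nat)) : Int) := by omega
  rw [hcast]
  have h0 : mkM N f = mkM N (fun i j => if i = P ∧ P < j ∧ j < P + 1 then f P P - ((j : Int) - (P : Int)) else f i j) := by
    apply mkM_congr; intro i j _ _
    rw [if_neg (by omega)]
  rw [h0, fillH_aux N P f hP (N - (P + 1)) (P + 1) (by omega) (by omega)]
  apply mkM_congr; intro i j hi hj
  by_cases h : i = P ∧ P < j
  · rw [if_pos ⟨h.1, h.2, hj⟩, if_pos h]
  · rw [if_neg (by rintro ⟨a, b, c⟩; exact h ⟨a, b⟩), if_neg h]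

theorem fillV_aux (N P : Nat) (f : Nat → Nat → Int) (hP : P < N) :
    ∀ d c, c + d = N → P < c →
    (PySem.List.pyRange (c : Int) (N : Int) 1).foldl
        (fun mt i => pvSet2 mt i (P : Int) (pvGet2 mt (i - 1) (P : Int) - 1))
        (mkM N (fun i j => if j = P ∧ P < i ∧ i < c then f P P - ((i : Int) - (P : Int)) else f i j))
      = mkM N (fun i j => if j = P ∧ P < i ∧ i < N then f P P - ((i : Int) - (P : Int)) else f i j) := by
  intro d
  induction d with
  | zero =>
    intro c hc hPc
    have : c = N := by omega
    subst this
    rw [PySem.List.pyRange_one_eq_nil (le_refl _)]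
    rfl
  | succ d ih =>
    intro c hc hPc
    have hcN : c < N := by omega
    rw [PySem.List.pyRange_one_cons (by exact_mod_cast hcN)]
    simp only [List.foldl_cons]
    have hc1 : ((c : Int) - 1) = (((c - 1 : Nat)) : Int) := by omega
    rw [hc1, get2_mk N _ (c - 1) P (by omega) hP]
    rw [set2_mk N _ c P _ hcN hP]
    have hcast : ((c : Int) + 1) = (((c + 1 : Nat)) : Int) := by omega
    rw [hcast]
    have hcon : mkM N (fun i j => if i = c ∧ j = P then
          (if P = P ∧ P < c - 1 ∧ c - 1 < c then f P P - (((c - 1 : Nat) : Int) - (P : Int)) else f (c - 1) P) - 1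
        else if j = P ∧ P < i ∧ i < c then f P P - ((i : Int) - (P : Int)) else f i j)
        = mkM N (fun i j => if j = P ∧ P < i ∧ i < c + 1 then f P P - ((i : Int) - (P : Int)) else f i j) := by
      apply mkM_congr
      intro i j hi hj
      by_cases hij : i = c ∧ j = P
      · obtain ⟨hi', hj'⟩ := hij
        rw [if_pos ⟨hi', hj'⟩, if_pos (show j = P ∧ P < i ∧ i < c + 1 from ⟨hj', by omega, by omega⟩), hi']
        by_cases hPl : P < c - 1
        · rw [if_pos (⟨rfl, hPl, by omega⟩ : P = P ∧ P < c - 1 ∧ c - 1 < c)]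
          have he : (((c - 1 : Nat)) : Int) - (P : Int) = ((c : Int) - (P : Int)) - 1 := by omega
          rw [he]; ring
        · have hPe : P = c - 1 := by omega
          rw [if_neg (by omega)]
          rw [← hPe]
          have he : ((c : Int) - (P : Int)) = 1 := by omega
          rw [he]
      · rw [if_neg hij]
        by_cases h2 : j = P ∧ P < i ∧ i < c
        · rw [if_pos h2, if_pos ⟨h2.1, h2.2.1, by omega⟩]
        · rw [if_neg h2, if_neg ?_]
          rintro ⟨ha, hb, hcc⟩
          by_cases hic : i = c
          · exact hij ⟨hic, ha⟩
          · exact h2 ⟨ha, hb, by omega⟩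
    rw [hcon]
    exact ih (c + 1) (by omega) (by omega)

theorem fillV_mk (N P : Nat) (f : Nat → Nat → Int) (hP : P < N) :
    pvFillV (mkM N f) (N : Int) (P : Int)
      = mkM N (fun i j => if j = P ∧ P < i then f P P - ((i : Int) - (P : Int)) else f i j) := by
  unfold pvFillV
  have hcast : ((P : Int) + 1) = (((P + 1 : Nat)) : Int) := by omega
  rw [hcast]
  have h0 : mkM N f = mkM N (fun i j => if j = P ∧ P < i ∧ i < P + 1 then f P P - ((i : Int) - (P : Int)) else f i j) := by
    apply mkM_congr; intro i j _ _
    rw [if_neg (by omega)]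
  rw [h0, fillV_aux N P f hP (N - (P + 1)) (P + 1) (by omega) (by omega)]
  apply mkM_congr; intro i j hi hj
  by_cases h : j = P ∧ P < i
  · rw [if_pos ⟨h.1, h.2, hi⟩, if_pos h]
  · rw [if_neg (by rintro ⟨a, b, c⟩; exact h ⟨a, b⟩), if_neg h]

-- the closed form truncated at diagonal level t
def pvF (m k t : Int) (i j : Nat) : Int :=
  if ((min i j : Nat) : Int) ≤ t then m + (min i j : Nat) * k - |(i : Int) - (j : Int)| else 0

theorem step_mk (N P : Nat) (m k : Int) (hP : P < N) :
    pvFillV (pvFillH (pvSet2 (mkM N (pvF m k ((P : Int) - 1))) (P : Int) (P : Int) (m + (P : Int) * k))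
        (N : Int) (P : Int)) (N : Int) (P : Int)
      = mkM N (pvF m k (P : Int)) := by
  rw [set2_mk N _ P P _ hP hP, fillH_mk N P _ hP, fillV_mk N P _ hP]
  apply mkM_congr
  intro i j hi hj
  simp only [lt_irrefl, and_false, if_false, and_self, if_true]
  by_cases hV : j = P ∧ P < i
  · rw [if_pos hV]
    obtain ⟨hj', hii⟩ := hV
    have hm : min i j = P := by omega
    rw [pvF, if_pos (by omega), hm, hj']
    rw [abs_of_nonneg (by omega)]
    try ring
  · rw [if_neg hV]
    by_cases hH : i = P ∧ P < j
    · rw [if_pos hH]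
      obtain ⟨hi', hjj⟩ := hH
      have hm : min i j = P := by omega
      rw [pvF, if_pos (by omega), hm, hi']
      rw [abs_of_nonpos (by omega)]
      try ring
    · rw [if_neg hH]
      by_cases hD : i = P ∧ j = P
      · rw [if_pos hD]
        obtain ⟨hi', hj'⟩ := hD
        have hm : min i j = P := by omega
        rw [pvF, if_pos (by omega), hm, hi', hj']
        simp
      · rw [if_neg hD]
        by_cases hle : min i j < P
        · rw [pvF, pvF, if_pos (by omega), if_pos (by omega)]
        · have hgt : P < min i j := by omega
          rw [pvF, pvF, if_neg (by omega), if_neg (by omega)]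

theorem outer_mk (N : Nat) (m k : Int) (t : Nat) (h1 : 1 ≤ t) :
    t ≤ N →
    (PySem.List.pyRange 1 (t : Int) 1).foldl
      (fun mt i =>
        let mt := pvSet2 mt i i (pvGet2 mt (i - 1) (i - 1) + k)
        let mt := pvFillH mt (N : Int) i
        pvFillV mt (N : Int) i) (mkM N (pvF m k 0))
      = mkM N (pvF m k ((t : Int) - 1)) := by
  induction t, h1 using Nat.le_induction with
  | base =>
    intro _
    rw [show ((1 : Nat) : Int) = 1 from by norm_num, PySem.List.pyRange_one_eq_nil (le_refl 1)]
    norm_num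
  | succ t ht ih =>
    intro hle
    have hcast : (((t + 1 : Nat)) : Int) = (t : Int) + 1 := by push_cast; ring
    rw [hcast, PySem.List.pyRange_one_succ_right (by exact_mod_cast ht), List.foldl_append]
    rw [ih (by omega)]
    simp only [List.foldl_cons, List.foldl_nil]
    have h1' : ((t : Int) - 1) = (((t - 1 : Nat)) : Int) := by omega
    rw [h1', get2_mk N _ (t - 1) (t - 1) (by omega) (by omega)]
    have hval : pvF m k ((((t - 1 : Nat)) : Int)) (t - 1) (t - 1) + k = m + (t : Int) * k := by
      rw [pvF, if_pos (by simp)]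
      simp only [Nat.min_self, sub_self, abs_zero]
      have he : (((t - 1 : Nat)) : Int) = (t : Int) - 1 := by omega
      rw [he]; ring
    rw [hval, ← h1']
    show pvFillV (pvFillH (pvSet2 (mkM N (pvF m k ((t : Int) - 1))) (t : Int) (t : Int) (m + (t : Int) * k)) (N : Int) (t : Int)) (N : Int) (t : Int) = _
    rw [step_mk N t m k (by omega)]
    norm_num

theorem final_alt (N : Nat) (m k : Int) (_hN : 1 ≤ N) :
    mkM N (pvF m k ((N : Int) - 1)) = tripleRecursion_alt (N : Int) m k := by
  unfold mkM tripleRecursion_alt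
  rw [PySem.List.pyRange_one]
  simp only [sub_zero, Int.toNat_natCast, List.map_map, zero_add]
  refine List.map_congr_left fun i hi => ?_
  refine List.map_congr_left fun j hj => ?_
  have hi' : i < N := List.mem_range.mp hi
  have hj' : j < N := List.mem_range.mp hj
  rw [pvF, if_pos (by omega)]
  simp only [Function.comp_apply]
  push_cast
  ring

theorem main_eq (n m k : Int) (hpre : 1 ≤ n) :
    tripleRecursion n m k = tripleRecursion_alt n m k := by
  have hn : ((n.toNat : Nat) : Int) = n := Int.toNat_of_nonneg (by omega)
  set N := n.toNat with hNdef
  have hN1 : 1 ≤ N := by omega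
  rw [← hn]
  show (PySem.List.pyRange 1 (N : Int) 1).foldl
      (fun mt i =>
        let mt := pvSet2 mt i i (pvGet2 mt (i - 1) (i - 1) + k)
        let mt := pvFillH mt (N : Int) i
        pvFillV mt (N : Int) i)
      (pvFillV (pvFillH (pvSet2 ((PySem.List.pyRange 0 (N : Int) 1).map
          (fun _ => (PySem.List.pyRange 0 (N : Int) 1).map (fun _ => (0 : Int)))) 0 0 m)
        (N : Int) 0) (N : Int) 0)
      = tripleRecursion_alt (N : Int) m k
  have hinit : (PySem.List.pyRange 0 (N : Int) 1).map
      (fun _ => (PySem.List.pyRange 0 (N : Int) 1).map (fun _ => (0 : Int)))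
      = mkM N (fun _ _ => (0 : Int)) := by
    rw [PySem.List.pyRange_one]
    simp [mkM, List.map_map, Function.comp_def]
  rw [hinit]
  have hstep := step_mk N 0 m k (by omega)
  simp only [Nat.cast_zero] at hstep
  rw [show (0 : Int) - 1 = -1 from by norm_num, show m + 0 * k = m from by ring] at hstep
  rw [show mkM N (fun _ _ => (0 : Int)) = mkM N (pvF m k (-1)) from
    mkM_congr _ _ _ (fun i j _ _ => by rw [pvF, if_neg (by omega)])]
  rw [hstep, outer_mk N m k N hN1 (le_refl N)]
  exact final_alt N m k hN1


-- ===== VERDICT (by name: the statement is the Claim_ definition above) =====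
theorem tripleRecursion_spec : Claim_equal_tripleRecursion := by
  intro n m k _ hpre
  unfold Spec_tripleRecursion
  exact main_eq n m k hpre
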